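-- pv_equiv track=rewrite | github.com/coleoguy/SCARAB | TOB/scripts/goat_pull.py | infer_project
-- ===== SOURCE A (Python) =====
-- PREFIX_TO_PROJECT = {
--     "ic": "DToL",
--     "il": "DToL",
--     "id": "DToL",
--     "ia": "DToL",
--     "iy": "DToL",
--     "dr": "ERGA",  # ERGA Iberian
--     "bge": "ERGA-BGE",
--     "ds": "ERGA",
--     "xb": "ERGA",
--     "ag": "Ag100Pest",
--     "idcol": "i5k",
--     "aag": "Ag100Pest",
-- }
--
-- def infer_project(assembly_name):
--     """Infer sequencing project from assembly name prefix convention."""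
--     if not assembly_name:
--         return "unknown"
--     name_lower = assembly_name.lower()
--     # Try common prefixes in order of length (longest first to avoid false matches)
--     for prefix in sorted(PREFIX_TO_PROJECT.keys(), key=len, reverse=True):
--         if name_lower.startswith(prefix):
--             return PREFIX_TO_PROJECT[prefix]
--     # Check for EBP-style names
--     if "ebp" in name_lower:
--         return "EBP"
--     if "caltech" in name_lower or "dovetail" in name_lower:
--         return "other"
--     return "unknown"
-- ===== SOURCE B (Python) =====
-- def infer_project(assembly_name):
--     """Infer sequencing project from assembly name prefix convention."""
--     if not assembly_name:
--         return "unknown"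
--     nl = assembly_name.lower()
--     c1, c2 = nl[0], nl[1:2]
--     # Hand-compiled decision tree over the first characters; no dict, no sort, no scan.
--     project = None
--     if c1 == "i":
--         if c2 in ("c", "l", "a", "y"):
--             project = "DToL"
--         elif c2 == "d":
--             project = "i5k" if nl[2:5] == "col" else "DToL"
--     elif c1 == "b":
--         if nl[1:3] == "ge":
--             project = "ERGA-BGE"
--     elif c1 == "a":
--         if c2 == "g" or nl[1:3] == "ag":
--             project = "Ag100Pest"
--     elif c1 == "d" and c2 in ("r", "s"):
--         project = "ERGA"
--     elif c1 == "x" and c2 == "b":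
--         project = "ERGA"
--     if project is not None:
--         return project
--     if "ebp" in nl:
--         return "EBP"
--     if "caltech" in nl or "dovetail" in nl:
--         return "other"
--     return "unknown"
-- ===== Notes on version B (the rewrite author's own statement) =====
-- stated objective: alternative
-- what changed: B discards the dict and A's sort-the-keys-then-startswith scan entirely, replacing them with a hand-compiled decision tree that branches on the first characters of the lowercased name (nested comparisons, no loop, no sort, no dict); the fallback checks are unchanged.
import Mathlib
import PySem

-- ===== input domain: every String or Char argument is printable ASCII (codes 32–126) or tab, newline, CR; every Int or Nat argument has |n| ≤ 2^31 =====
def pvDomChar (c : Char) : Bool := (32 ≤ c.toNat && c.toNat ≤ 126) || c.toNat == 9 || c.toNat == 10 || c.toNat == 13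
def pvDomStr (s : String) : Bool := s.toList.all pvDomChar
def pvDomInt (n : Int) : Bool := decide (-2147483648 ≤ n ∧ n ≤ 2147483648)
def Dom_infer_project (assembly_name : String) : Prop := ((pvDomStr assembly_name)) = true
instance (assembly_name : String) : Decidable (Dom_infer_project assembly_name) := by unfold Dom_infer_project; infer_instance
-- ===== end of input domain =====

-- B replaces A's sort-the-dict-keys-and-startswith scan by a hand-compiled decision tree on the
-- first characters of the lowercased name (no dict, no sort, no loop); same value everywhere.

-- ===== PORT A =====
def pvPrefixToProject : PySem.Dict String String :=
  PySem.Dict.ofList [("ic","DToL"),("il","DToL"),("id","DToL"),("ia","DToL"),("iy","DToL"),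
    ("dr","ERGA"),("bge","ERGA-BGE"),("ds","ERGA"),("xb","ERGA"),("ag","Ag100Pest"),
    ("idcol","i5k"),("aag","Ag100Pest")]

def inferLoopA (nl : String) : List String → Option String
  | [] => none
  | p :: ps =>
    if PySem.Str.startswith nl p then some ((pvPrefixToProject.get? p).getD "unknown")
    else inferLoopA nl ps

def infer_project (assembly_name : String) : String :=
  if assembly_name == "" then "unknown" else
  let nl := PySem.Str.lower assembly_name
  match inferLoopA nl (PySem.List.sorted pvPrefixToProject.keys (fun k => PySem.Str.len k) true) with
  | some r => r
  | none =>
    if PySem.Str.isIn "ebp" nl then "EBP"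
    else if PySem.Str.isIn "caltech" nl || PySem.Str.isIn "dovetail" nl then "other"
    else "unknown"

-- ===== PORT B =====
-- B's character slices nl[0], nl[1:2], nl[1:3], nl[2:5] are ported exactly as head/take/drop of
-- nl.toList (A slice of a string is its character sublist; exact on every input).
def treeB (cs : List Char) : Option String :=
  match cs with
  | [] => none
  | c1 :: rest =>
    if c1 = 'i' then
      if rest.take 1 = ['c'] ∨ rest.take 1 = ['l'] ∨ rest.take 1 = ['a'] ∨ rest.take 1 = ['y'] then
        some "DToL"
      else if rest.take 1 = ['d'] then
        if (rest.drop 1).take 3 = ['c','o','l'] then some "i5k" else some "DToL"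
      else none
    else if c1 = 'b' then
      if rest.take 2 = ['g','e'] then some "ERGA-BGE" else none
    else if c1 = 'a' then
      if rest.take 1 = ['g'] ∨ rest.take 2 = ['a','g'] then some "Ag100Pest" else none
    else if c1 = 'd' ∧ (rest.take 1 = ['r'] ∨ rest.take 1 = ['s']) then some "ERGA"
    else if c1 = 'x' ∧ rest.take 1 = ['b'] then some "ERGA"
    else none

def infer_project_alt (assembly_name : String) : String :=
  if assembly_name == "" then "unknown" else
  let nl := PySem.Str.lower assembly_name
  match treeB nl.toList with
  | some project => project
  | none =>
    if PySem.Str.isIn "ebp" nl then "EBP"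
    else if PySem.Str.isIn "caltech" nl || PySem.Str.isIn "dovetail" nl then "other"
    else "unknown"

-- ===== PRECONDITION & SPEC =====
def Spec_infer_project (assembly_name : String) (out : String) : Prop := out = infer_project_alt assembly_name
instance (assembly_name : String) (out : String) : Decidable (Spec_infer_project assembly_name out) := by unfold Spec_infer_project; infer_instance

-- ===== CLAIM (what is proved, stated in full; the proofs are below) =====
def Claim_equal_infer_project : Prop := ∀ (assembly_name : String), Dom_infer_project assembly_name → Spec_infer_project assembly_name (infer_project assembly_name)

-- ===== LEMMAS AND PROOFS =====
theorem sw_iff (nl p : String) : PySem.Str.startswith nl p = true ↔ p.toList = nl.toList.take p.toList.length := by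
  rw [PySem.Str.startswith_eq, PySem.Chars.startswith_iff, List.prefix_iff_eq_take]

theorem sorted_keys_norm :
    PySem.List.sorted pvPrefixToProject.keys (fun k => PySem.Str.len k) true
      = ["idcol","bge","aag","ic","il","id","ia","iy","dr","ds","xb","ag"] := by decide

-- A's sorted-keys loop, written as the explicit chain of prefix tests it performs
def chainA (c : List Char) : Option String :=
  if ['i','d','c','o','l'] = c.take 5 then some "i5k"
  else if ['b','g','e'] = c.take 3 then some "ERGA-BGE"
  else if ['a','a','g'] = c.take 3 then some "Ag100Pest"
  else if ['i','c'] = c.take 2 then some "DToL"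
  else if ['i','l'] = c.take 2 then some "DToL"
  else if ['i','d'] = c.take 2 then some "DToL"
  else if ['i','a'] = c.take 2 then some "DToL"
  else if ['i','y'] = c.take 2 then some "DToL"
  else if ['d','r'] = c.take 2 then some "ERGA"
  else if ['d','s'] = c.take 2 then some "ERGA"
  else if ['x','b'] = c.take 2 then some "ERGA"
  else if ['a','g'] = c.take 2 then some "Ag100Pest"
  else none

set_option maxHeartbeats 1000000 in
theorem chainA_eq_treeB (c : List Char) : chainA c = treeB c := by
  rcases c with _|⟨a, r⟩
  · rfl
  rcases r with _|⟨b, r⟩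
  · simp [chainA, treeB]
  by_cases ha : a = 'i'
  · subst ha
    by_cases hd : b = 'd'
    · subst hd
      by_cases hc : List.take 3 r = ['c','o','l'] <;> simp [chainA, treeB, eq_comm, hc]
    · by_cases h1 : b = 'c'
      · subst h1; simp [chainA, treeB]
      · by_cases h2 : b = 'l'
        · subst h2; simp [chainA, treeB]
        · by_cases h3 : b = 'a'
          · subst h3; simp [chainA, treeB]
          · by_cases h4 : b = 'y'
            · subst h4; simp [chainA, treeB]
            · simp [chainA, treeB, eq_comm, hd, h1, h2, h3, h4]
  · by_cases hb : a = 'b'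
    · subst hb
      by_cases hg : b = 'g'
      · subst hg
        by_cases he : List.take 1 r = ['e'] <;> simp [chainA, treeB, eq_comm, he]
      · simp [chainA, treeB, eq_comm, hg]
    · by_cases haa : a = 'a'
      · subst haa
        by_cases hg : b = 'g'
        · subst hg; simp [chainA, treeB]
        · by_cases h2 : b = 'a'
          · subst h2
            by_cases hgr : List.take 1 r = ['g'] <;> simp [chainA, treeB, eq_comm, hgr]
          · simp [chainA, treeB, eq_comm, hg, h2]
      · by_cases hdd : a = 'd'
        · subst hdd
          by_cases h1 : b = 'r'
          · subst h1; simp [chainA, treeB]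
          · by_cases h2 : b = 's'
            · subst h2; simp [chainA, treeB]
            · simp [chainA, treeB, eq_comm, h1, h2]
        · by_cases hx : a = 'x'
          · subst hx
            by_cases h1 : b = 'b'
            · subst h1; simp [chainA, treeB]
            · simp [chainA, treeB, eq_comm, h1]
          · simp [chainA, treeB, eq_comm, ha, hb, haa, hdd, hx]

set_option maxHeartbeats 1000000 in
theorem loopA_eq_chainA (nl : String) :
    inferLoopA nl ["idcol","bge","aag","ic","il","id","ia","iy","dr","ds","xb","ag"]
      = chainA nl.toList := by
  have v1 : ((pvPrefixToProject.get? "idcol").getD "unknown") = "i5k" := by decide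
  have v2 : ((pvPrefixToProject.get? "bge").getD "unknown") = "ERGA-BGE" := by decide
  have v3 : ((pvPrefixToProject.get? "aag").getD "unknown") = "Ag100Pest" := by decide
  have v4 : ((pvPrefixToProject.get? "ic").getD "unknown") = "DToL" := by decide
  have v5 : ((pvPrefixToProject.get? "il").getD "unknown") = "DToL" := by decide
  have v6 : ((pvPrefixToProject.get? "id").getD "unknown") = "DToL" := by decide
  have v7 : ((pvPrefixToProject.get? "ia").getD "unknown") = "DToL" := by decide
  have v8 : ((pvPrefixToProject.get? "iy").getD "unknown") = "DToL" := by decide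
  have v9 : ((pvPrefixToProject.get? "dr").getD "unknown") = "ERGA" := by decide
  have v10 : ((pvPrefixToProject.get? "ds").getD "unknown") = "ERGA" := by decide
  have v11 : ((pvPrefixToProject.get? "xb").getD "unknown") = "ERGA" := by decide
  have v12 : ((pvPrefixToProject.get? "ag").getD "unknown") = "Ag100Pest" := by decide
  have t1 : "idcol".toList = ['i','d','c','o','l'] := by decide
  have t2 : "bge".toList = ['b','g','e'] := by decide
  have t3 : "aag".toList = ['a','a','g'] := by decide
  have t4 : "ic".toList = ['i','c'] := by decide
  have t5 : "il".toList = ['i','l'] := by decide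
  have t6 : "id".toList = ['i','d'] := by decide
  have t7 : "ia".toList = ['i','a'] := by decide
  have t8 : "iy".toList = ['i','y'] := by decide
  have t9 : "dr".toList = ['d','r'] := by decide
  have t10 : "ds".toList = ['d','s'] := by decide
  have t11 : "xb".toList = ['x','b'] := by decide
  have t12 : "ag".toList = ['a','g'] := by decide
  have sw : ∀ p : String, (PySem.Str.startswith nl p = true) = (p.toList = nl.toList.take p.toList.length) := by
    intro p; exact propext (sw_iff nl p)
  simp only [inferLoopA, sw, v1, v2, v3, v4, v5, v6, v7, v8, v9, v10, v11, v12,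
    t1, t2, t3, t4, t5, t6, t7, t8, t9, t10, t11, t12,
    List.length_cons, List.length_nil, chainA]


-- ===== VERDICT (by name: the statement is the Claim_ definition above) =====
theorem infer_project_spec : Claim_equal_infer_project := by
  intro s _
  unfold Spec_infer_project infer_project infer_project_alt
  by_cases he : (s == "") = true
  · simp [he]
  · simp only [he, if_false, Bool.false_eq_true]
    rw [sorted_keys_norm, loopA_eq_chainA, chainA_eq_treeB]
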